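-- pv_equiv track=rewrite | github.com/gnanarepo/aviso-core | infra/mongo_utils.py | _determine_period_field_name
-- ===== SOURCE A (Python) =====
-- def _determine_period_field_name(close_periods):
--     """
--     Determines the MongoDB field name for filtering based on the type of periods provided.
--
--     Args:
--         close_periods (list): List of periods to analyze (e.g., weekly or non-weekly).
--
--     Returns:
--         str: The field name ('weekly_period' if all periods contain 'W', else 'close_period').
--
--     Raises:
--         TypeError: If periods is not a list of strings.
--         ValueError: If periods is empty.
--     """
--     if not isinstance(close_periods, list):
--         raise TypeError("close_periods must be a list")
--     if not close_periods:
--         raise ValueError("close_periods list cannot be empty")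
--     if not all(isinstance(period, str) for period in close_periods):
--         raise TypeError("all elements in close_periods must be strings")
--
--     return 'weekly_period' if all('W' in period for period in close_periods) else 'close_period'
-- ===== SOURCE B (Python) =====
-- def _field_dc(periods):
--     """Divide and conquer: split the list in half, compute the field name of
--     each half recursively, and combine — the whole list is weekly iff both
--     halves are.  Recursion depth is O(log n)."""
--     if not periods:
--         return 'weekly_period'
--     if len(periods) == 1:
--         p = periods[0]
--         if not isinstance(p, str):
--             raise TypeError("all elements in close_periods must be strings")
--         return 'weekly_period' if 'W' in p else 'close_period'
--     mid = len(periods) // 2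
--     left = _field_dc(periods[:mid])
--     right = _field_dc(periods[mid:])
--     if left == 'weekly_period' and right == 'weekly_period':
--         return 'weekly_period'
--     return 'close_period'
--
--
-- def _determine_period_field_name(close_periods):
--     if not isinstance(close_periods, list):
--         raise TypeError("close_periods must be a list")
--     if not close_periods:
--         raise ValueError("close_periods list cannot be empty")
--     return _field_dc(close_periods)
-- ===== Notes on version B (the rewrite author's own statement) =====
-- stated objective: alternative
-- what changed: A's two staged all()-comprehension scans are replaced by a balanced divide-and-conquer recursion that splits the list in half, computes each half's field name, and combines ('weekly_period' iff both halves are weekly), type-checking elements at the leaves.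
import Mathlib
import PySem

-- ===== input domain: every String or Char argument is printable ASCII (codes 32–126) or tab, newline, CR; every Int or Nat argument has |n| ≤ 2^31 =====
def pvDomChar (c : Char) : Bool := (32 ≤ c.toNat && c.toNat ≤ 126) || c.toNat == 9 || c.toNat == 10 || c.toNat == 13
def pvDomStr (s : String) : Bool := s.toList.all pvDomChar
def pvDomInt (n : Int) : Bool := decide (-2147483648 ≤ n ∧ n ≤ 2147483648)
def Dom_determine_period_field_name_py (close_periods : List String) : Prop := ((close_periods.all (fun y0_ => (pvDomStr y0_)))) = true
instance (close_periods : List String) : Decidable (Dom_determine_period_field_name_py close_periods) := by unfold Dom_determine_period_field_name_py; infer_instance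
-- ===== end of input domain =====

-- B replaces A's two staged all() scans by a balanced divide-and-conquer recursion ('alternative', same task).
-- ===== PORT A =====
-- literal transliteration of A: the isinstance-list and all-strings guards hold trivially
-- under the type convention; emptiness (ValueError) is excluded by Pre_; then the
-- conditional on all('W' in period).
def determine_period_field_name_py (close_periods : List String) : String :=
  if close_periods.all (fun period => PySem.Str.isIn "W" period) then "weekly_period"
  else "close_period"

-- ===== PORT B =====
-- transliteration of B's _field_dc: split in half, recurse on each half, combine.
def fieldDC (periods : List String) : String :=
  match periods with
  | [] => "weekly_period"
  | [p] => if PySem.Str.isIn "W" p then "weekly_period" else "close_period"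
  | p :: q :: rest =>
    let l := p :: q :: rest
    let mid := l.length / 2
    let left := fieldDC (l.take mid)
    let right := fieldDC (l.drop mid)
    if left = "weekly_period" ∧ right = "weekly_period" then "weekly_period"
    else "close_period"
termination_by periods.length
decreasing_by
  · simp [List.length_take]; omega
  · simp; omega

def determine_period_field_name_py_alt (close_periods : List String) : String :=
  fieldDC close_periods

-- ===== PRECONDITION & SPEC =====
-- A raises ValueError on the empty list; excluded here.
def Pre_determine_period_field_name_py (close_periods : List String) : Prop := close_periods ≠ []
instance (close_periods : List String) : Decidable (Pre_determine_period_field_name_py close_periods) := by unfold Pre_determine_period_field_name_py; infer_instance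
def pvWitness_determine_period_field_name_py : List String := ["W01"]
def Spec_determine_period_field_name_py (close_periods : List String) (out : String) : Prop := out = determine_period_field_name_py_alt close_periods
instance (close_periods : List String) (out : String) : Decidable (Spec_determine_period_field_name_py close_periods out) := by unfold Spec_determine_period_field_name_py; infer_instance

-- ===== CLAIM (what is proved, stated in full; the proofs are below) =====
def Claim_equal_determine_period_field_name_py : Prop := ∀ (close_periods : List String), Dom_determine_period_field_name_py close_periods → Pre_determine_period_field_name_py close_periods → Spec_determine_period_field_name_py close_periods (determine_period_field_name_py close_periods)

-- ===== LEMMAS AND PROOFS =====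

-- the divide-and-conquer result is 'weekly_period' exactly when every element contains 'W'
theorem fieldDC_eq_all (l : List String) :
    fieldDC l =
      (if l.all (fun period => PySem.Str.isIn "W" period) then "weekly_period" else "close_period") := by
  fun_induction fieldDC l with
  | case1 => rfl
  | case2 p h =>
    simp only [List.all_cons, List.all_nil, Bool.and_true, h, if_pos]
  | case3 p h =>
    rw [Bool.not_eq_true] at h
    simp only [List.all_cons, List.all_nil, Bool.and_true, h, Bool.false_eq_true, if_false]
  | case4 a b c d e f g h i j =>
    obtain ⟨hf, hg⟩ := h
    have hf' : fieldDC (List.take e d) = "weekly_period" := hf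
    have hg' : fieldDC (List.drop e d) = "weekly_period" := hg
    rw [i] at hf'
    rw [j] at hg'
    have ht : ((List.take e d).all fun period => PySem.Str.isIn "W" period) = true := by
      by_contra hb
      rw [if_neg hb] at hf'
      exact absurd hf' (by decide)
    have hd : ((List.drop e d).all fun period => PySem.Str.isIn "W" period) = true := by
      by_contra hb
      rw [if_neg hb] at hg'
      exact absurd hg' (by decide)
    have hsplit : a :: b :: c = List.take e d ++ List.drop e d :=
      (List.take_append_drop e d).symm
    rw [hsplit, List.all_append, ht, hd]
    rfl
  | case5 a b c d e f g h i j =>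
    have hsplit : a :: b :: c = List.take e d ++ List.drop e d :=
      (List.take_append_drop e d).symm
    by_cases hall : ((a :: b :: c).all fun period => PySem.Str.isIn "W" period) = true
    · exfalso
      rw [hsplit, List.all_append, Bool.and_eq_true] at hall
      exact h ⟨show fieldDC (List.take e d) = _ by rw [i, if_pos hall.1],
               show fieldDC (List.drop e d) = _ by rw [j, if_pos hall.2]⟩
    · rw [if_neg hall]

-- ===== VERDICT (by name: the statement is the Claim_ definition above) =====
theorem determine_period_field_name_py_spec : Claim_equal_determine_period_field_name_py := by
  intro cp _ _
  unfold Spec_determine_period_field_name_py determine_period_field_name_py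
    determine_period_field_name_py_alt
  rw [fieldDC_eq_all]
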